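-- pv_equiv track=rewrite | github.com/KonstantoJr/advent_of_code | 2023/Day_02/part2.py | check_valid_game
-- ===== SOURCE A (Python) =====
-- RED = 12
--
-- GREEN = 13
--
-- BLUE = 14
--
-- def check_valid_game(curr_game):
--     """Checks if the game is valid"""
--     # for each set in game the values for the color need to be less than the constants
--     for curr_set in curr_game:
--         if 'red' in curr_set and curr_set['red'] > RED:
--             return False
--         if 'green' in curr_set and curr_set['green'] > GREEN:
--             return False
--         if 'blue' in curr_set and curr_set['blue'] > BLUE:
--             return False
--     return True
-- ===== SOURCE B (Python) =====
-- RED = 12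
--
-- GREEN = 13
--
-- BLUE = 14
--
-- def check_valid_game(curr_game):
--     """Checks if the game is valid"""
--     # Aggregate the per-color maxima over all sets, then compare once.
--     maxima = {'red': 0, 'green': 0, 'blue': 0}
--     for curr_set in curr_game:
--         for color in maxima:
--             maxima[color] = max(maxima[color], curr_set.get(color, 0))
--     return maxima['red'] <= RED and maxima['green'] <= GREEN and maxima['blue'] <= BLUE
-- ===== Notes on version B (the rewrite author's own statement) =====
-- stated objective: alternative
-- what changed: B replaces A's per-set guarded early returns with a single pass that aggregates per-color maxima (the 'minimum cubes needed' reduction) followed by one three-way comparison at the end.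
import Mathlib
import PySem

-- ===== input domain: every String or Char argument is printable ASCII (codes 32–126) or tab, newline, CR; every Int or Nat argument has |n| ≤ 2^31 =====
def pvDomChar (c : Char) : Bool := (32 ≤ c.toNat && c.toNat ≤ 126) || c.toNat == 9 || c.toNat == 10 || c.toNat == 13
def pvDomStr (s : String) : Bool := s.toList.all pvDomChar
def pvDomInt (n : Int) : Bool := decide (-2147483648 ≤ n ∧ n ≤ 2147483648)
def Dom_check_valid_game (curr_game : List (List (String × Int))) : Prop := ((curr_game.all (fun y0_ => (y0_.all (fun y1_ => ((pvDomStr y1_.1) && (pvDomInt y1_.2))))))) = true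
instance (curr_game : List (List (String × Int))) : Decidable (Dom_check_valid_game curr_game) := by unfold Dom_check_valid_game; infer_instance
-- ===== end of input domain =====

-- B aggregates per-color maxima in one pass, then compares once; A early-returns per set. Equivalent on all inputs.

-- ===== PORT A =====
-- dict lookup on an association list: first match (Python dict semantics under the type convention)
def aGet? (d : List (String × Int)) (k : String) : Option Int :=
  (d.find? (fun p => p.1 == k)).map (·.2)

-- 'k in d and d[k] > c' of A
def aViol (d : List (String × Int)) (k : String) (c : Int) : Bool :=
  match aGet? d k with
  | some v => v > c
  | none => false

def check_valid_game : List (List (String × Int)) → Bool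
  | [] => true
  | s :: rest =>
    if aViol s "red" 12 then false
    else if aViol s "green" 13 then false
    else if aViol s "blue" 14 then false
    else check_valid_game rest

-- ===== PORT B =====
-- curr_set.get(color, 0) of B
def bGetD (d : List (String × Int)) (k : String) : Int :=
  ((d.find? (fun p => p.1 == k)).map (·.2)).getD 0

def bStep (m : Int × Int × Int) (s : List (String × Int)) : Int × Int × Int :=
  (max m.1 (bGetD s "red"), max m.2.1 (bGetD s "green"), max m.2.2 (bGetD s "blue"))

def check_valid_game_alt (curr_game : List (List (String × Int))) : Bool :=
  let m := curr_game.foldl bStep (0, 0, 0)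
  decide (m.1 ≤ 12) && decide (m.2.1 ≤ 13) && decide (m.2.2 ≤ 14)

-- ===== PRECONDITION & SPEC =====
def Spec_check_valid_game (curr_game : List (List (String × Int))) (out : Bool) : Prop := out = check_valid_game_alt curr_game
instance (curr_game : List (List (String × Int))) (out : Bool) : Decidable (Spec_check_valid_game curr_game out) := by unfold Spec_check_valid_game; infer_instance

-- ===== CLAIM (what is proved, stated in full; the proofs are below) =====
def Claim_equal_check_valid_game : Prop := ∀ (curr_game : List (List (String × Int))), Dom_check_valid_game curr_game → Spec_check_valid_game curr_game (check_valid_game curr_game)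

-- ===== LEMMAS AND PROOFS =====

lemma aViol_iff (s : List (String × Int)) (k : String) (c : Int) (hc : 0 ≤ c) :
    aViol s k c = false ↔ bGetD s k ≤ c := by
  unfold aViol aGet? bGetD
  cases s.find? (fun p => p.1 == k) with
  | none => simpa using hc
  | some p => simp only [Option.map_some, Option.getD_some, decide_eq_false_iff_not]; omega

lemma foldl_le (g : List (List (String × Int))) :
    ∀ r gr b : Int,
      ((g.foldl bStep (r, gr, b)).1 ≤ 12 ∧ (g.foldl bStep (r, gr, b)).2.1 ≤ 13
        ∧ (g.foldl bStep (r, gr, b)).2.2 ≤ 14)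
      ↔ (check_valid_game g = true ∧ r ≤ 12 ∧ gr ≤ 13 ∧ b ≤ 14) := by
  induction g with
  | nil => intro r gr b; simp [check_valid_game]
  | cons s rest ih =>
    intro r gr b
    simp only [List.foldl_cons, bStep]
    rw [ih (max r (bGetD s "red")) (max gr (bGetD s "green")) (max b (bGetD s "blue"))]
    show _ ↔ ((if aViol s "red" 12 then false
      else if aViol s "green" 13 then false
      else if aViol s "blue" 14 then false
      else check_valid_game rest) = true ∧ _)
    by_cases hr : aViol s "red" 12 = true
    · have hr' : ¬ bGetD s "red" ≤ 12 := by
        intro h'; rw [← aViol_iff s "red" 12 (by norm_num)] at h'; simp [hr] at h'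
      simp [hr]; omega
    · rw [Bool.not_eq_true] at hr
      have hr' := (aViol_iff s "red" 12 (by norm_num)).mp hr
      by_cases hg : aViol s "green" 13 = true
      · have hg' : ¬ bGetD s "green" ≤ 13 := by
          intro h'; rw [← aViol_iff s "green" 13 (by norm_num)] at h'; simp [hg] at h'
        simp [hr, hg]; omega
      · rw [Bool.not_eq_true] at hg
        have hg' := (aViol_iff s "green" 13 (by norm_num)).mp hg
        by_cases hb : aViol s "blue" 14 = true
        · have hb' : ¬ bGetD s "blue" ≤ 14 := by
            intro h'; rw [← aViol_iff s "blue" 14 (by norm_num)] at h'; simp [hb] at h'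
          simp [hr, hg, hb]; omega
        · rw [Bool.not_eq_true] at hb
          have hb' := (aViol_iff s "blue" 14 (by norm_num)).mp hb
          simp only [hr, hg, hb, Bool.false_eq_true, if_false]
          cases hrest : check_valid_game rest
          · simp [hrest]
          · simp only [hrest, max_le_iff, true_and]
            constructor
            · rintro ⟨⟨h1, _⟩, ⟨h2, _⟩, h3, _⟩; exact ⟨h1, h2, h3⟩
            · rintro ⟨h1, h2, h3⟩; exact ⟨⟨h1, hr'⟩, ⟨h2, hg'⟩, h3, hb'⟩

-- ===== VERDICT (by name: the statement is the Claim_ definition above) =====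
theorem check_valid_game_spec : Claim_equal_check_valid_game := by
  intro g _
  unfold Spec_check_valid_game check_valid_game_alt
  show check_valid_game g = (decide ((g.foldl bStep (0, 0, 0)).1 ≤ 12)
    && decide ((g.foldl bStep (0, 0, 0)).2.1 ≤ 13) && decide ((g.foldl bStep (0, 0, 0)).2.2 ≤ 14))
  have h : ((g.foldl bStep (0, 0, 0)).1 ≤ 12 ∧ (g.foldl bStep (0, 0, 0)).2.1 ≤ 13
      ∧ (g.foldl bStep (0, 0, 0)).2.2 ≤ 14) ↔ check_valid_game g = true := by
    rw [foldl_le g 0 0 0]; norm_num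
  rw [Bool.eq_iff_iff]
  simp only [Bool.and_eq_true, decide_eq_true_iff]
  constructor
  · intro hA; have hc := h.mpr hA; tauto
  · intro hB; exact h.mp (by tauto)
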